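-- pv_equiv track=rewrite | github.com/kaifcoder/codecrafters-shell | app/main.py | extract_redirection_info
-- ===== SOURCE A (Python) =====
-- def extract_redirection_info(token, next_token):
--     """Extract redirection operator and filename from token(s).
--
--     Returns: (operator, filename, tokens_consumed)
--     """
--     SPACED_OPS = ('>', '>>', '1>', '1>>', '2>', '2>>')
--     INLINE_OPS = ('2>>', '1>>', '>>', '2>', '1>', '>')
--
--     if token in SPACED_OPS:
--         return token, next_token, 2 if next_token else 1
--
--     for op in INLINE_OPS:
--         if token.startswith(op):
--             return op, token[len(op):], 1
--
--     return None, None, 0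
-- ===== SOURCE B (Python) =====
-- def extract_redirection_info(token, next_token):
--     """Extract redirection operator and filename from token(s).
--
--     Returns: (operator, filename, tokens_consumed)
--     """
--     # structural parse: optional fd digit ('1'/'2' followed by '>'), then '>>' or '>'
--     fd, rest = '', token
--     if token[:1] in ('1', '2') and token[1:2] == '>':
--         fd, rest = token[0], token[1:]
--     if rest.startswith('>>'):
--         op, filename = fd + '>>', rest[2:]
--     elif rest.startswith('>'):
--         op, filename = fd + '>', rest[1:]
--     else:
--         return None, None, 0
--     if filename:                       # inline form: 'op' glued to its filename
--         return op, filename, 1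
--     # bare operator token: filename comes from the next token
--     return op, next_token, 2 if next_token else 1
-- ===== Notes on version B (the rewrite author's own statement) =====
-- stated objective: alternative
-- what changed: A tests membership in a SPACED_OPS tuple and then scans a fixed 6-element INLINE_OPS tuple with startswith/len slicing; B has neither list: it parses the token structurally (optional fd digit '1'/'2' followed by '>', then '>>' before '>') and recognises a bare spaced operator by its empty inline filename.
import Mathlib
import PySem

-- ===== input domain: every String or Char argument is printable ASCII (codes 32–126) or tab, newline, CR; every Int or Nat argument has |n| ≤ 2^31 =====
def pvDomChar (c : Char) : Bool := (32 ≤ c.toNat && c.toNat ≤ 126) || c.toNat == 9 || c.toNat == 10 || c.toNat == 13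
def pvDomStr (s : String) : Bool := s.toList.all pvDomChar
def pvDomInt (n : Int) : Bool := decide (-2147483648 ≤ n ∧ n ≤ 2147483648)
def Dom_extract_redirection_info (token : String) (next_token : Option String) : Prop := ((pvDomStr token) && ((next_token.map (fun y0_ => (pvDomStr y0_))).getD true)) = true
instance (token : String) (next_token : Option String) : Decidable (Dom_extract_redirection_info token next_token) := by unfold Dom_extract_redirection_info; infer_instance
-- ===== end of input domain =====

-- B drops A's SPACED membership test and INLINE operator-tuple scan entirely and instead
-- parses the token structurally (optional fd digit '1'/'2' + '>', then '>>' or '>'); a bare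
-- operator token is recognised by its empty inline filename. Objective: alternative decomposition.

-- ===== PORT A =====
-- 'for op in INLINE_OPS: if token.startswith(op): return op, token[len(op):], 1'
def aInlineLoop (token : String) : List String → Option String × Option String × Int
  | [] => (none, none, 0)
  | op :: ops =>
    if PySem.Str.startswith token op then
      (some op, some (PySem.Str.slice token (some (PySem.Str.len op)) none), 1)
    else aInlineLoop token ops

def extract_redirection_info (token : String) (next_token : Option String) : Option String × Option String × Int :=
  if token ∈ ([">", ">>", "1>", "1>>", "2>", "2>>"] : List String) then
    (some token, next_token,
      match next_token with        -- '2 if next_token else 1' (None and '' are falsy)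
      | some s => if s = "" then 1 else 2
      | none => 1)
  else
    aInlineLoop token ["2>>", "1>>", ">>", "2>", "1>", ">"]

-- ===== PORT B =====
def extract_redirection_info_alt (token : String) (next_token : Option String) : Option String × Option String × Int :=
  -- fd, rest = '', token; if token[:1] in ('1','2') and token[1:2] == '>': fd, rest = token[0], token[1:]
  let fdRest : String × String :=
    if (PySem.Str.slice token none (some 1) = "1" ∨ PySem.Str.slice token none (some 1) = "2")
        ∧ PySem.Str.slice token (some 1) (some 2) = ">" then
      (PySem.Str.slice token none (some 1), PySem.Str.slice token (some 1) none)
    else ("", token)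
  -- op, filename from the arrow ('>>' before '>'), else no redirection
  let opFile : Option (String × String) :=
    if PySem.Str.startswith fdRest.2 ">>" then
      some (fdRest.1 ++ ">>", PySem.Str.slice fdRest.2 (some 2) none)
    else if PySem.Str.startswith fdRest.2 ">" then
      some (fdRest.1 ++ ">", PySem.Str.slice fdRest.2 (some 1) none)
    else none
  match opFile with
  | none => (none, none, 0)
  | some (op, filename) =>
    if filename ≠ "" then (some op, some filename, 1)    -- inline form: op glued to filename
    else                                                 -- bare operator: filename is the next token
      (some op, next_token,
        match next_token with      -- '2 if next_token else 1' (None and '' are falsy)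
        | some s => if s = "" then 1 else 2
        | none => 1)

-- ===== PRECONDITION & SPEC =====
def Spec_extract_redirection_info (token : String) (next_token : Option String) (out : Option String × Option String × Int) : Prop := out = extract_redirection_info_alt token next_token
instance (token : String) (next_token : Option String) (out : Option String × Option String × Int) : Decidable (Spec_extract_redirection_info token next_token out) := by unfold Spec_extract_redirection_info; infer_instance

-- ===== CLAIM (what is proved, stated in full; the proofs are below) =====
def Claim_equal_extract_redirection_info : Prop := ∀ (token : String) (next_token : Option String), Dom_extract_redirection_info token next_token → Spec_extract_redirection_info token next_token (extract_redirection_info token next_token)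

-- ===== LEMMAS AND PROOFS =====

-- '2 if next_token else 1'
def cf (next : Option String) : Int :=
  match next with
  | some s => if s = "" then 1 else 2
  | none => 1

-- list-level picture of A
def aListForm (cs : List Char) : Option String × Option String × Int :=
  if PySem.Chars.startswith cs ['2','>','>'] then (some "2>>", some (String.ofList (cs.drop 3)), 1)
  else if PySem.Chars.startswith cs ['1','>','>'] then (some "1>>", some (String.ofList (cs.drop 3)), 1)
  else if PySem.Chars.startswith cs ['>','>'] then (some ">>", some (String.ofList (cs.drop 2)), 1)
  else if PySem.Chars.startswith cs ['2','>'] then (some "2>", some (String.ofList (cs.drop 2)), 1)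
  else if PySem.Chars.startswith cs ['1','>'] then (some "1>", some (String.ofList (cs.drop 2)), 1)
  else if PySem.Chars.startswith cs ['>'] then (some ">", some (String.ofList (cs.drop 1)), 1)
  else (none, none, 0)

def aForm (cs : List Char) (next : Option String) : Option String × Option String × Int :=
  if cs ∈ [['>'], ['>','>'], ['1','>'], ['1','>','>'], ['2','>'], ['2','>','>']] then
    (some (String.ofList cs), next, cf next)
  else aListForm cs

-- list-level picture of B
def finishForm (op file : List Char) (next : Option String) : Option String × Option String × Int :=
  if file ≠ [] then (some (String.ofList op), some (String.ofList file), 1)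
  else (some (String.ofList op), next, cf next)

def bParseForm (fd rest : List Char) (next : Option String) : Option String × Option String × Int :=
  if PySem.Chars.startswith rest ['>','>'] then finishForm (fd ++ ['>','>']) (rest.drop 2) next
  else if PySem.Chars.startswith rest ['>'] then finishForm (fd ++ ['>']) (rest.drop 1) next
  else (none, none, 0)

def bForm (cs : List Char) (next : Option String) : Option String × Option String × Int :=
  if (cs.take 1 = ['1'] ∨ cs.take 1 = ['2']) ∧ (cs.drop 1).take 1 = ['>'] then
    bParseForm (cs.take 1) (cs.drop 1) next
  else bParseForm [] cs next

-- cheap standalone bridges (each proved once, cited by name below)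
theorem sw_bridge (t : String) (p : List Char) :
    PySem.Str.startswith t (String.ofList p) = PySem.Chars.startswith t.toList p := by
  simp [pysem]

theorem drop_bridge1 (t : String) : PySem.Str.slice t (some 1) none = String.ofList (t.toList.drop 1) := by
  simp [String.ext_iff, pysem]
theorem drop_bridge2 (t : String) : PySem.Str.slice t (some 2) none = String.ofList (t.toList.drop 2) := by
  simp [String.ext_iff, pysem]
theorem drop_bridge3 (t : String) : PySem.Str.slice t (some 3) none = String.ofList (t.toList.drop 3) := by
  simp [String.ext_iff, pysem]
theorem take_bridge1 (t : String) : PySem.Str.slice t none (some 1) = String.ofList (t.toList.take 1) := by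
  simp [String.ext_iff, pysem]
theorem mid_bridge (t : String) : PySem.Str.slice t (some 1) (some 2) = String.ofList ((t.toList.drop 1).take 1) := by
  simp [String.ext_iff, pysem]
theorem ofList_eq_lit (xs : List Char) (s : String) : (String.ofList xs = s) ↔ xs = s.toList := by
  simp [String.ext_iff]
theorem toList_ofList' (xs : List Char) : (String.ofList xs).toList = xs := by simp

theorem lhs_eq (t : String) :
    aInlineLoop t ["2>>", "1>>", ">>", "2>", "1>", ">"] = aListForm t.toList := by
  have l3 : PySem.Str.len "2>>" = 3 := rfl
  have l3' : PySem.Str.len "1>>" = 3 := rfl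
  have l2 : PySem.Str.len ">>" = 2 := rfl
  have l2' : PySem.Str.len "2>" = 2 := rfl
  have l2'' : PySem.Str.len "1>" = 2 := rfl
  have l1 : PySem.Str.len ">" = 1 := rfl
  have o1 : ("2>>" : String) = String.ofList ['2','>','>'] := rfl
  have o2 : ("1>>" : String) = String.ofList ['1','>','>'] := rfl
  have o3 : (">>" : String) = String.ofList ['>','>'] := rfl
  have o4 : ("2>" : String) = String.ofList ['2','>'] := rfl
  have o5 : ("1>" : String) = String.ofList ['1','>'] := rfl
  have o6 : (">" : String) = String.ofList ['>'] := rfl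
  simp only [aInlineLoop, aListForm, l3, l3', l2, l2', l2'', l1,
    drop_bridge1, drop_bridge2, drop_bridge3]
  rw [o1, o2, o3, o4, o5, o6]
  simp only [sw_bridge]

theorem a_eq_aForm (t : String) (next : Option String) :
    extract_redirection_info t next = aForm t.toList next := by
  have hmem : t ∈ ([">", ">>", "1>", "1>>", "2>", "2>>"] : List String)
      ↔ t.toList ∈ [['>'], ['>','>'], ['1','>'], ['1','>','>'], ['2','>'], ['2','>','>']] := by
    have q1 : (">" : String) = String.ofList ['>'] := rfl
    have q2 : (">>" : String) = String.ofList ['>','>'] := rfl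
    have q3 : ("1>" : String) = String.ofList ['1','>'] := rfl
    have q4 : ("1>>" : String) = String.ofList ['1','>','>'] := rfl
    have q5 : ("2>" : String) = String.ofList ['2','>'] := rfl
    have q6 : ("2>>" : String) = String.ofList ['2','>','>'] := rfl
    rw [q1, q2, q3, q4, q5, q6]
    simp only [List.mem_cons, List.not_mem_nil, or_false, eq_comm (a := t)]
    constructor
    · rintro (h|h|h|h|h|h) <;> simp [h.symm]
    · rintro (h|h|h|h|h|h) <;> simp [h.symm]
  by_cases hm : t.toList ∈ [['>'], ['>','>'], ['1','>'], ['1','>','>'], ['2','>'], ['2','>','>']]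
  · rw [extract_redirection_info.eq_def, if_pos (hmem.mpr hm), aForm, if_pos hm, String.ofList_toList]
    rfl
  · rw [extract_redirection_info.eq_def, if_neg (fun h => hm (hmem.mp h)), aForm, if_neg hm, lhs_eq]

set_option maxHeartbeats 1600000 in
theorem b_eq_bForm (t : String) (next : Option String) :
    extract_redirection_info_alt t next = bForm t.toList next := by
  have tl1 : ("1" : String).toList = ['1'] := rfl
  have tl2 : ("2" : String).toList = ['2'] := rfl
  have tlg : (">" : String).toList = ['>'] := rfl
  have tle : ("" : String).toList = ([] : List Char) := rfl
  have hcond : ((PySem.Str.slice t none (some 1) = "1" ∨ PySem.Str.slice t none (some 1) = "2")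
          ∧ PySem.Str.slice t (some 1) (some 2) = ">")
      ↔ ((t.toList.take 1 = ['1'] ∨ t.toList.take 1 = ['2']) ∧ (t.toList.drop 1).take 1 = ['>']) := by
    rw [take_bridge1, mid_bridge, ofList_eq_lit, ofList_eq_lit, ofList_eq_lit, tl1, tl2, tlg]
  have swgg : ∀ (s : String), PySem.Str.startswith s ">>" = PySem.Chars.startswith s.toList ['>','>'] :=
    fun s => by rw [show (">>" : String) = String.ofList ['>','>'] from rfl, sw_bridge]
  have swg : ∀ (s : String), PySem.Str.startswith s ">" = PySem.Chars.startswith s.toList ['>'] :=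
    fun s => by rw [show (">" : String) = String.ofList ['>'] from rfl, sw_bridge]
  unfold extract_redirection_info_alt bForm bParseForm finishForm
  simp only [hcond]
  by_cases hfd : (t.toList.take 1 = ['1'] ∨ t.toList.take 1 = ['2']) ∧ (t.toList.drop 1).take 1 = ['>']
  · simp only [if_pos hfd, swgg, swg, drop_bridge1, toList_ofList']
    cases h2 : PySem.Chars.startswith (t.toList.drop 1) ['>','>'] with
    | true =>
      simp [take_bridge1, drop_bridge2, ofList_eq_lit, tle, cf,
        show (">>" : String) = String.ofList ['>','>'] from rfl]
    | false =>
      cases h1 : PySem.Chars.startswith (t.toList.drop 1) ['>'] with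
      | true =>
        simp [take_bridge1, ofList_eq_lit, tle, cf,
          show (">" : String) = String.ofList ['>'] from rfl]
      | false =>
        simp
  · simp only [if_neg hfd, swgg, swg]
    cases h2 : PySem.Chars.startswith t.toList ['>','>'] with
    | true =>
      simp [drop_bridge2, ofList_eq_lit, tle, cf,
        show (">>" : String) = String.ofList ['>','>'] from rfl]
    | false =>
      cases h1 : PySem.Chars.startswith t.toList ['>'] with
      | true =>
        simp [drop_bridge1, ofList_eq_lit, tle, cf,
          show (">" : String) = String.ofList ['>'] from rfl]
      | false =>
        simp

theorem forms_eq (cs : List Char) (next : Option String) : aForm cs next = bForm cs next := by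
  rcases cs with _ | ⟨c, cs⟩
  · simp [aForm, bForm, aListForm, bParseForm, PySem.Chars.startswith_iff]
  rcases cs with _ | ⟨d, cs⟩
  · by_cases hc : '>' = c
    · subst hc
      simp [aForm, bForm, aListForm, bParseForm, finishForm, PySem.Chars.startswith_iff,
        List.cons_prefix_cons]
    · have hc' : ¬ (c = '>') := fun h => hc h.symm
      by_cases hc1 : c = '1' <;> by_cases hc2 : c = '2' <;>
        simp_all [aForm, bForm, aListForm, bParseForm, PySem.Chars.startswith_iff,
          List.cons_prefix_cons]
  rcases cs with _ | ⟨e, cs⟩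
  · by_cases hc1 : '1' = c
    · subst hc1
      by_cases hd : '>' = d
      · subst hd
        simp [aForm, bForm, aListForm, bParseForm, finishForm, PySem.Chars.startswith_iff,
          List.cons_prefix_cons]
      · have hd' : ¬ (d = '>') := fun h => hd h.symm
        simp [aForm, bForm, aListForm, bParseForm, finishForm, PySem.Chars.startswith_iff,
          List.cons_prefix_cons, hd, hd']
    · by_cases hc2 : '2' = c
      · subst hc2
        by_cases hd : '>' = d
        · subst hd
          simp [aForm, bForm, aListForm, bParseForm, finishForm, PySem.Chars.startswith_iff,
            List.cons_prefix_cons]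
        · have hd' : ¬ (d = '>') := fun h => hd h.symm
          simp [aForm, bForm, aListForm, bParseForm, finishForm, PySem.Chars.startswith_iff,
            List.cons_prefix_cons, hd, hd']
      · by_cases hcg : '>' = c
        · subst hcg
          by_cases hd : '>' = d
          · subst hd
            simp [aForm, bForm, aListForm, bParseForm, finishForm, PySem.Chars.startswith_iff,
              List.cons_prefix_cons]
          · have hd' : ¬ (d = '>') := fun h => hd h.symm
            simp [aForm, bForm, aListForm, bParseForm, finishForm, PySem.Chars.startswith_iff,
              List.cons_prefix_cons, hd, hd']
        · have hc1' : ¬ (c = '1') := fun h => hc1 h.symm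
          have hc2' : ¬ (c = '2') := fun h => hc2 h.symm
          have hcg' : ¬ (c = '>') := fun h => hcg h.symm
          simp [aForm, bForm, aListForm, bParseForm, PySem.Chars.startswith_iff,
            List.cons_prefix_cons, hc1, hc2, hcg, hc1', hc2', hcg']
  by_cases hc1 : '1' = c
  · subst hc1
    by_cases hd : '>' = d
    · subst hd
      by_cases he : '>' = e
      · subst he
        simp [aForm, bForm, aListForm, bParseForm, finishForm, PySem.Chars.startswith_iff,
          List.cons_prefix_cons]
        split_ifs with h <;> simp [h]
      · have he' : ¬ (e = '>') := fun h => he h.symm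
        simp [aForm, bForm, aListForm, bParseForm, finishForm, PySem.Chars.startswith_iff,
          List.cons_prefix_cons, he, he']
    · have hd' : ¬ (d = '>') := fun h => hd h.symm
      simp [aForm, bForm, aListForm, bParseForm, PySem.Chars.startswith_iff,
        List.cons_prefix_cons, hd, hd']
  · by_cases hc2 : '2' = c
    · subst hc2
      by_cases hd : '>' = d
      · subst hd
        by_cases he : '>' = e
        · subst he
          simp [aForm, bForm, aListForm, bParseForm, finishForm, PySem.Chars.startswith_iff,
            List.cons_prefix_cons]
          split_ifs with h <;> simp [h]
        · have he' : ¬ (e = '>') := fun h => he h.symm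
          simp [aForm, bForm, aListForm, bParseForm, finishForm, PySem.Chars.startswith_iff,
            List.cons_prefix_cons, he, he']
      · have hd' : ¬ (d = '>') := fun h => hd h.symm
        simp [aForm, bForm, aListForm, bParseForm, PySem.Chars.startswith_iff,
          List.cons_prefix_cons, hd, hd']
    · by_cases hcg : '>' = c
      · subst hcg
        by_cases hd : '>' = d
        · subst hd
          simp [aForm, bForm, aListForm, bParseForm, finishForm, PySem.Chars.startswith_iff,
            List.cons_prefix_cons]
        · have hd' : ¬ (d = '>') := fun h => hd h.symm
          simp [aForm, bForm, aListForm, bParseForm, finishForm, PySem.Chars.startswith_iff,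
            List.cons_prefix_cons, hd, hd']
      · have hc1' : ¬ (c = '1') := fun h => hc1 h.symm
        have hc2' : ¬ (c = '2') := fun h => hc2 h.symm
        have hcg' : ¬ (c = '>') := fun h => hcg h.symm
        simp [aForm, bForm, aListForm, bParseForm, PySem.Chars.startswith_iff,
          List.cons_prefix_cons, hc1, hc2, hcg, hc1', hc2', hcg']

-- ===== VERDICT (by name: the statement is the Claim_ definition above) =====
theorem extract_redirection_info_spec : Claim_equal_extract_redirection_info := by
  intro token next_token _
  unfold Spec_extract_redirection_info
  rw [a_eq_aForm, b_eq_bForm, forms_eq]
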